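-- pv_equiv track=rewrite | github.com/pedramsalimi/MAYA | maya/framework/ontologies/extractOnto.py | _infer_base_iri
-- ===== SOURCE A (Python) =====
-- from typing import Dict, Any, List, Optional
--
-- def _infer_base_iri(uris: List[str]) -> Optional[str]:
--     """Heuristic: get common prefix of class/property IRIs and cut at last / or #."""
--     if not uris:
--         return None
--     prefix = uris[0]
--     for u in uris[1:]:
--         # common prefix
--         while not u.startswith(prefix) and prefix:
--             prefix = prefix[:-1]
--         if not prefix:
--             break
--     if not prefix:
--         return None
--     # cut at last / or #
--     cut_positions = [prefix.rfind("/"), prefix.rfind("#")]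
--     cut = max(cut_positions)
--     if cut <= 0:
--         return prefix
--     return prefix[: cut + 1]
-- ===== SOURCE B (Python) =====
-- from typing import Dict, Any, List, Optional
--
-- def _infer_base_iri(uris: List[str]) -> Optional[str]:
--     """Heuristic: get common prefix of class/property IRIs and cut at last / or #."""
--     if not uris:
--         return None
--     prefix = uris[0]
--     for u in uris[1:]:
--         n = min(len(prefix), len(u))
--         i = 0
--         while i < n and prefix[i] == u[i]:
--             i += 1
--         prefix = prefix[:i]
--     if not prefix:
--         return None
--     cut = max(prefix.rfind("/"), prefix.rfind("#"))
--     if cut <= 0: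
--         return prefix
--     return prefix[: cut + 1]
-- ===== Notes on version B (the rewrite author's own statement) =====
-- stated objective: alternative
-- what changed: B finds the common prefix by one direct forward character scan per string (mismatch index, then a single slice) instead of A's repeated startswith tests that shrink the prefix one character at a time; it trades A's C-level startswith calls for an explicit scan, so it is not measurably faster in CPython.
import Mathlib
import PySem

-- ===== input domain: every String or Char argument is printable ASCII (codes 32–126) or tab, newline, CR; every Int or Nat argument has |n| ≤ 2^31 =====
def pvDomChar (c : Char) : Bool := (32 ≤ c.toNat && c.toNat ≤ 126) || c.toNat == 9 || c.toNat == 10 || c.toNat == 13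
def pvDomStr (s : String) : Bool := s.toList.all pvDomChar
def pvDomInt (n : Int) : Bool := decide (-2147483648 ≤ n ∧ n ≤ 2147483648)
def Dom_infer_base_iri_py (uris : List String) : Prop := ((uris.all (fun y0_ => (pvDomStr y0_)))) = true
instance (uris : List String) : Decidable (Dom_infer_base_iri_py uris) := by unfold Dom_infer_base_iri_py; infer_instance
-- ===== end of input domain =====

-- B replaces A's repeated startswith-and-shrink search for the common prefix by one direct
-- forward character scan per string (mismatch index, then a single slice): an alternative algorithm.

-- ===== PORT A =====
-- the inner 'while not u.startswith(prefix) and prefix: prefix = prefix[:-1]'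
def pvShrinkA (u p : String) : String :=
  if (PySem.Str.startswith u p) = false ∧ p ≠ "" then
    pvShrinkA u (PySem.Str.slice p none (some (-1)))
  else p
termination_by p.toList.length
decreasing_by
  rename_i h
  simp only [PySem.Str.toList_slice, PySem.Chars.slice, PySem.List.slice_to_neg_one]
  have hp : p.toList ≠ [] := fun hc => h.2 (String.toList_inj.mp (by simp [hc]))
  have hp0 : p.toList.length ≠ 0 := by simpa using hp
  simp only [List.length_dropLast]
  omega

-- the 'for u in uris[1:]' loop with its 'if not prefix: break'
def pvLoopA : List String → String → String
  | [], p => p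
  | u :: rest, p =>
    let p' := pvShrinkA u p
    if p' = "" then p' else pvLoopA rest p'

def infer_base_iri_py (uris : List String) : Option String :=
  match uris with
  | [] => none
  | u0 :: rest =>
    let pfx := pvLoopA rest u0
    if pfx = "" then none
    else
      let cut := max (PySem.Str.rfind pfx "/") (PySem.Str.rfind pfx "#")
      if cut ≤ 0 then some pfx
      else some (PySem.Str.slice pfx none (some (cut + 1)))

-- ===== PORT B =====
-- the 'while i < n and prefix[i] == u[i]: i += 1' mismatch scan: returns the final i
def pvScanB : List Char → List Char → Nat
  | a :: as, b :: bs => if a = b then pvScanB as bs + 1 else 0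
  | _, _ => 0

-- one body of B's for-loop: 'prefix = prefix[:i]'
def pvStepB (p u : String) : String :=
  PySem.Str.slice p none (some ((pvScanB p.toList u.toList : Nat) : Int))

def infer_base_iri_py_alt (uris : List String) : Option String :=
  match uris with
  | [] => none
  | u0 :: rest =>
    let pfx := rest.foldl pvStepB u0
    if pfx = "" then none
    else
      let cut := max (PySem.Str.rfind pfx "/") (PySem.Str.rfind pfx "#")
      if cut ≤ 0 then some pfx
      else some (PySem.Str.slice pfx none (some (cut + 1)))

-- ===== PRECONDITION & SPEC =====
def Spec_infer_base_iri_py (uris : List String) (out : Option String) : Prop := out = infer_base_iri_py_alt uris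
instance (uris : List String) (out : Option String) : Decidable (Spec_infer_base_iri_py uris out) := by unfold Spec_infer_base_iri_py; infer_instance

-- ===== CLAIM (what is proved, stated in full; the proofs are below) =====
def Claim_equal_infer_base_iri_py : Prop := ∀ (uris : List String), Dom_infer_base_iri_py uris → Spec_infer_base_iri_py uris (infer_base_iri_py uris)

-- ===== LEMMAS AND PROOFS =====

lemma pvScanB_cons_eq (a : Char) (as bs : List Char) :
    pvScanB (a :: as) (a :: bs) = pvScanB as bs + 1 := by simp [pvScanB]

-- when p is a prefix of u, the scan runs to the end of p
lemma pvScanB_of_prefix : ∀ (p u : List Char), p <+: u → pvScanB p u = p.length := by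
  intro p
  induction p with
  | nil => intro u _; simp [pvScanB]
  | cons a as ih =>
    intro u h
    cases u with
    | nil => exact absurd (List.eq_nil_of_prefix_nil h) (by simp)
    | cons b bs =>
      obtain ⟨rfl, h2⟩ := (List.cons_prefix_cons).mp h
      simp [pvScanB, ih bs h2]

-- dropping the last char of a non-prefix p does not change the common prefix
lemma pvScan_dropLast : ∀ (p u : List Char), ¬ p <+: u →
    p.dropLast.take (pvScanB p.dropLast u) = p.take (pvScanB p u) := by
  intro p
  induction p with
  | nil => intro u h; exact absurd (List.nil_prefix) h
  | cons a as ih =>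
    intro u h
    cases u with
    | nil =>
      simp only [pvScanB]
      cases as with
      | nil => simp [pvScanB]
      | cons c cs => simp [pvScanB]
    | cons b bs =>
      by_cases hab : a = b
      · subst hab
        have has : ¬ as <+: bs := fun hc => h (List.cons_prefix_cons.mpr ⟨rfl, hc⟩)
        have hasne : as ≠ [] := fun hc => has (by simp [hc])
        rw [List.dropLast_cons_of_ne_nil hasne]
        rw [pvScanB_cons_eq, pvScanB_cons_eq, List.take_succ_cons, List.take_succ_cons, ih bs has]
      · simp only [pvScanB, if_neg hab, List.take_zero]
        cases as with
        | nil => simp [pvScanB]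
        | cons c cs =>
          rw [List.dropLast_cons_of_ne_nil (by simp)]
          simp [pvScanB, hab]

-- A's shrink loop computes the common prefix that B's scan computes
lemma pvShrinkA_toList : ∀ (n : Nat) (p : String), p.toList.length = n → ∀ (u : String),
    (pvShrinkA u p).toList = p.toList.take (pvScanB p.toList u.toList) := by
  intro n
  induction n using Nat.strong_induction_on with
  | _ n ih =>
    intro p hn u
    rw [pvShrinkA]
    by_cases hc : (PySem.Str.startswith u p) = false ∧ p ≠ ""
    · rw [if_pos hc]
      have hp : p.toList ≠ [] := fun hx => hc.2 (String.toList_inj.mp (by simp [hx]))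
      have hp0 : p.toList.length ≠ 0 := by simpa using hp
      have hlen : (PySem.Str.slice p none (some (-1))).toList.length < n := by
        rw [PySem.Str.toList_slice]
        simp only [PySem.Chars.slice, PySem.List.slice_to_neg_one, List.length_dropLast]
        omega
      have hpre : ¬ p.toList <+: u.toList := by
        intro hx
        have : PySem.Str.startswith u p = true := by
          rw [PySem.Str.startswith_eq, PySem.Chars.startswith]
          exact List.isPrefixOf_iff_prefix.mpr hx
        rw [hc.1] at this; exact Bool.false_ne_true this
      rw [ih _ hlen _ rfl u]
      simp only [PySem.Str.toList_slice, PySem.Chars.slice, PySem.List.slice_to_neg_one]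
      exact pvScan_dropLast p.toList u.toList hpre
    · rw [if_neg hc]
      rcases not_and_or.mp hc with h1 | h2
      · have hpre : p.toList <+: u.toList := by
          have : PySem.Str.startswith u p = true := by
            cases hb : PySem.Str.startswith u p with
            | false => exact absurd hb h1
            | true => rfl
          rw [PySem.Str.startswith_eq, PySem.Chars.startswith] at this
          exact List.isPrefixOf_iff_prefix.mp this
        rw [pvScanB_of_prefix _ _ hpre, List.take_length]
      · have : p = "" := not_not.mp h2
        subst this
        simp [pvScanB]

-- one A-step equals one B-step, as Strings
lemma pvShrinkA_eq_stepB (u p : String) : pvShrinkA u p = pvStepB p u := by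
  apply String.toList_inj.mp
  rw [pvShrinkA_toList p.toList.length p rfl u]
  unfold pvStepB
  rw [PySem.Str.toList_slice]
  exact (PySem.List.slice_to_natCast p.toList (pvScanB p.toList u.toList)).symm

lemma pvStepB_empty (u : String) : pvStepB "" u = "" := by
  apply String.toList_inj.mp
  unfold pvStepB
  rw [PySem.Str.toList_slice, PySem.Chars.slice, PySem.List.slice_to_natCast]
  simp

lemma pvFoldB_empty : ∀ (rest : List String), rest.foldl pvStepB "" = "" := by
  intro rest
  induction rest with
  | nil => rfl
  | cons u us ih => simp [List.foldl_cons, pvStepB_empty, ih]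

-- A's early-break loop equals B's fold
lemma pvLoop_eq : ∀ (rest : List String) (p : String), pvLoopA rest p = rest.foldl pvStepB p := by
  intro rest
  induction rest with
  | nil => intro p; rfl
  | cons u us ih =>
    intro p
    simp only [pvLoopA, List.foldl_cons, pvShrinkA_eq_stepB]
    by_cases h : pvStepB p u = ""
    · rw [if_pos h, h, pvFoldB_empty]
    · rw [if_neg h, ih]

-- ===== VERDICT (by name: the statement is the Claim_ definition above) =====
theorem infer_base_iri_py_spec : Claim_equal_infer_base_iri_py := by
  intro uris _
  unfold Spec_infer_base_iri_py
  cases uris with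
  | nil => rfl
  | cons u0 rest =>
    simp only [infer_base_iri_py, infer_base_iri_py_alt]
    rw [pvLoop_eq]
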